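-- pv_equiv track=rewrite | github.com/isildonmez/leetcode | src/python/src/odd_string_difference.py | oddString
-- ===== SOURCE A (Python) =====
-- from collections import defaultdict
--
-- def oddString(words: list[str]) -> str:
--     n = len(words[0])
--     diff_to_word = defaultdict(list)
--     for word in words:
--         diff = []
--         for i in range(1, n):
--             diff.append(ord(word[i]) - ord(word[i - 1]))
--         diff_to_word[tuple(diff)].append(word)
--
--     for diff, words in diff_to_word.items():
--         if len(words) == 1:
--             return words[0]
-- ===== SOURCE B (Python) =====
-- def oddString(words: list[str]) -> str:
--     n = len(words[0])
--
--     def same(u, v):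
--         return all(ord(u[i]) - ord(u[i - 1]) == ord(v[i]) - ord(v[i - 1])
--                    for i in range(1, n))
--
--     for w in words:
--         if sum(1 for v in words if same(w, v)) == 1:
--             return w
-- ===== Notes on version B (the rewrite author's own statement) =====
-- stated objective: alternative
-- what changed: B builds no signature tuples and no dict at all: a brute-force double scan compares each word pairwise against every word with a short-circuiting consecutive-difference check and returns the first word matched by exactly one word (itself); A groups words in a defaultdict keyed by diff tuples and scans the groups.
-- outside the precondition, e.g. on oddString(['ab', 'ab']): A returns None, B returns None
import Mathlib
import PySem

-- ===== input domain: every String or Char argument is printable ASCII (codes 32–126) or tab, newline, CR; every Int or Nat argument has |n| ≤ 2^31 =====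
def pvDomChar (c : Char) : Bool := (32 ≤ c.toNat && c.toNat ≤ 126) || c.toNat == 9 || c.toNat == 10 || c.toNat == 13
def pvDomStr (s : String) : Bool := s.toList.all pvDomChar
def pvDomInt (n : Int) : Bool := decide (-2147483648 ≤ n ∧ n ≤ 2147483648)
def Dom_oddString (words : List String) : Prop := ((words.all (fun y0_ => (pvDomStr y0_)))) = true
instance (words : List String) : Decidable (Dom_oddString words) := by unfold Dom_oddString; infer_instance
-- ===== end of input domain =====

-- B replaces A's defaultdict grouping of diff-tuples by a dictionary-free brute-force double
-- scan comparing each word pairwise against every word; same result, different algorithm.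

-- ===== PORT A =====
-- the inner 'for i in range(1, n): diff.append(ord(word[i]) - ord(word[i-1]))'
def oddDiffA (n : Int) (w : String) : List Int :=
  (PySem.List.pyRange 1 n 1).foldl
    (fun diff i =>
      diff ++ [((PySem.List.pyGetD w.toList i ' ').toNat : Int)
               - ((PySem.List.pyGetD w.toList (i - 1) ' ').toNat : Int)]) []

-- the final 'for diff, words in diff_to_word.items(): if len(words) == 1: return words[0]'
-- ("" stands for the fall-through 'return None', which Pre_ excludes)
def oddFindA : List (List Int × List String) → String
  | [] => ""
  | (_, ws) :: rest => if ws.length == 1 then PySem.List.pyGetD ws 0 "" else oddFindA rest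

def oddString (words : List String) : String :=
  let n := PySem.Str.len (PySem.List.pyGetD words 0 "")
  let d := words.foldl (fun d w => d.modify (oddDiffA n w) [] (· ++ [w]))
            (PySem.Dict.empty : PySem.Dict (List Int) (List String))
  oddFindA d.items

-- ===== PORT B =====
-- 'all(ord(u[i]) - ord(u[i-1]) == ord(v[i]) - ord(v[i-1]) for i in range(1, n))'
def sameSig (n : Int) (u v : String) : Bool :=
  (PySem.List.pyRange 1 n 1).all
    (fun i =>
      ((PySem.List.pyGetD u.toList i ' ').toNat : Int)
        - ((PySem.List.pyGetD u.toList (i - 1) ' ').toNat : Int)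
      == ((PySem.List.pyGetD v.toList i ' ').toNat : Int)
        - ((PySem.List.pyGetD v.toList (i - 1) ' ').toNat : Int))

-- 'for w in words: if sum(1 for v in words if same(w, v)) == 1: return w'
-- ("" = the fall-through None, outside Pre_)
def oddScanB (n : Int) (allWords : List String) : List String → String
  | [] => ""
  | w :: rest =>
      if allWords.countP (fun v => sameSig n w v) == 1 then w else oddScanB n allWords rest

def oddString_alt (words : List String) : String :=
  let n := PySem.Str.len (PySem.List.pyGetD words 0 "")
  oddScanB n words words

-- ===== PRECONDITION & SPEC =====
-- consecutive char-code differences of a character list (pattern-based, no defaults)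
def oddSigP (cs : List Char) : List Int :=
  List.zipWith (fun a b => ((b.toNat : Int) - (a.toNat : Int))) cs cs.tail

-- Pre_ excludes: the empty list and lists containing a word shorter than words[0] (A raises
-- IndexError), and lists in which no signature occurs exactly once (A falls through and
-- returns None, which is not a str).
def Pre_oddString (words : List String) : Prop :=
  words ≠ [] ∧
  (∀ w ∈ words, (words.headD "").toList.length ≤ w.toList.length) ∧
  (∃ s ∈ words.map (fun w => oddSigP (w.toList.take (words.headD "").toList.length)),
     (words.map (fun w => oddSigP (w.toList.take (words.headD "").toList.length))).count s = 1)
instance (words : List String) : Decidable (Pre_oddString words) := by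
  unfold Pre_oddString; infer_instance

def pvWitness_oddString : List String := ["ab", "cc", "aa"]

def Spec_oddString (words : List String) (out : String) : Prop := out = oddString_alt words
instance (words : List String) (out : String) : Decidable (Spec_oddString words out) := by
  unfold Spec_oddString; infer_instance

-- ===== CLAIM (what is proved, stated in full; the proofs are below) =====
def Claim_equal_oddString : Prop :=
  ∀ (words : List String), Dom_oddString words → Pre_oddString words →
    Spec_oddString words (oddString words)

-- ===== LEMMAS AND PROOFS =====

-- specification-level signature of a word (consecutive char-code differences over the first n chars)
def oddSig (n : Nat) (cs : List Char) : List Int :=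
  (List.range (n - 1)).map (fun i => ((cs.getD (i + 1) ' ').toNat : Int) - ((cs.getD i ' ').toNat : Int))

-- the word list of a signature group, as it sits in A's dict
def oddGrp (l : List (String × List Int)) (k : List Int) : List String :=
  (l.filter (fun p => p.2 == k)).map (·.1)

-- A's diff loop computes the specification signature
lemma oddDiffA_eq (n : Nat) (w : String) : oddDiffA (n : Int) w = oddSig n w.toList := by
  unfold oddDiffA oddSig
  rw [PySem.List.foldl_append_singleton_eq_map, PySem.List.pyRange_one]
  simp only [List.nil_append, List.map_map]
  have hn : ((n : Int) - 1).toNat = n - 1 := by omega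
  rw [hn]
  refine List.map_congr_left ?_
  intro k _
  have h1 : (1 : Int) + (k : Int) = ((k + 1 : Nat) : Int) := by push_cast; ring
  have h2 : ((k + 1 : Nat) : Int) - 1 = ((k : Nat) : Int) := by push_cast; ring
  simp only [Function.comp_apply, h1, h2, PySem.List.pyGetD_natCast]

-- B's short-circuit comparison decides equality of the specification signatures
lemma sameSig_eq (n : Nat) (u v : String) :
    sameSig (n : Int) u v = (oddSig n u.toList == oddSig n v.toList) := by
  rw [Bool.eq_iff_iff, beq_iff_eq]
  unfold sameSig oddSig
  rw [PySem.List.pyRange_one]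
  have hn : ((n : Int) - 1).toNat = n - 1 := by omega
  rw [hn]
  simp only [List.all_map, List.all_eq_true, Function.comp_apply, beq_iff_eq,
    List.map_inj_left, List.mem_range]
  refine forall_congr' fun k => ?_
  refine imp_congr_right fun _ => ?_
  have h1 : (1 : Int) + (k : Int) = ((k + 1 : Nat) : Int) := by push_cast; ring
  have h2 : ((k + 1 : Nat) : Int) - 1 = ((k : Nat) : Int) := by push_cast; ring
  simp only [h1, h2, PySem.List.pyGetD_natCast]

-- oddFindA over a keyed group table, as a find? over the keys
lemma oddFindA_map (g : List Int → List String) (ks : List (List Int)) :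
    oddFindA (ks.map (fun k => (k, g k))) =
      match ks.find? (fun k => (g k).length == 1) with
      | some k => PySem.List.pyGetD (g k) 0 ""
      | none => "" := by
  induction ks with
  | nil => rfl
  | cons k ks ih =>
    simp only [List.map_cons, oddFindA, List.find?_cons]
    by_cases h : (g k).length == 1
    · simp [h]
    · simp only [h]; simpa using ih

-- oddScanB as a find? over the scanned words
lemma oddScanB_find (n : Int) (allWords : List String) (l : List String) :
    oddScanB n allWords l =
      match l.find? (fun w => allWords.countP (fun v => sameSig n w v) == 1) with
      | some w => w
      | none => "" := by
  induction l with
  | nil => rfl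
  | cons w l ih =>
    simp only [oddScanB, List.find?_cons]
    by_cases h : allWords.countP (fun v => sameSig n w v) == 1
    · simp [h]
    · simp only [h]; simpa using ih

-- B's pairwise-match count is the multiplicity of w's signature
lemma countP_sameSig (n : Nat) (allWords : List String) (w : String) :
    allWords.countP (fun v => sameSig (n : Int) w v) =
      (allWords.map (fun v => oddSig n v.toList)).count (oddSig n w.toList) := by
  rw [List.count_eq_countP, List.countP_map]
  refine List.countP_congr fun v _ => ?_
  rw [sameSig_eq, Bool.eq_iff_iff]
  simp only [Function.comp_apply, beq_iff_eq]
  constructor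
  · intro h; exact (h.mpr trivial).symm
  · intro h; exact iff_of_true h.symm trivial

-- PySem.Set.add only ever appends
lemma foldl_add_append (xs : List (List Int)) (s : PySem.Set (List Int)) :
    ∃ e, xs.foldl PySem.Set.add s = s ++ e := by
  induction xs generalizing s with
  | nil => exact ⟨[], by simp⟩
  | cons x xs ih =>
    simp only [List.foldl_cons]
    by_cases h : x ∈ s
    · rw [show PySem.Set.add s x = s by simp [PySem.Set.add, h]]
      exact ih s
    · rw [show PySem.Set.add s x = s ++ [x] by simp [PySem.Set.add, h]]
      obtain ⟨e, he⟩ := ih (s ++ [x])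
      exact ⟨x :: e, by simp [he]⟩

-- find? over the ordered dedup of S agrees with find? over S itself,
-- provided the predicate only holds on elements occurring exactly once
lemma find?_foldl_add (q : List Int → Bool) (xs : List (List Int)) (s : PySem.Set (List Int))
    (hs : s.find? q = none) (hdisj : ∀ x ∈ xs, q x = true → x ∉ s)
    (hdup : ∀ x ∈ xs, q x = true → xs.count x = 1) :
    (xs.foldl PySem.Set.add s).find? q = xs.find? q := by
  induction xs generalizing s with
  | nil => simpa using hs
  | cons x xs ih =>
    simp only [List.foldl_cons, List.find?_cons]
    by_cases hq : q x
    · have hxs : x ∉ s := hdisj x List.mem_cons_self hq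
      have hadd : PySem.Set.add s x = s ++ [x] := by simp [PySem.Set.add, hxs]
      obtain ⟨e, he⟩ := foldl_add_append xs (PySem.Set.add s x)
      rw [he, hadd, List.append_assoc, List.find?_append, List.find?_append, hs]
      simp [hq]
    · have hadd_none : (PySem.Set.add s x).find? q = none := by
        by_cases h : x ∈ s
        · rw [show PySem.Set.add s x = s by simp [PySem.Set.add, h]]
          exact hs
        · rw [show PySem.Set.add s x = s ++ [x] by simp [PySem.Set.add, h]]
          simp [List.find?_append, hs, hq]
      have hmem_add : ∀ y, y ∈ PySem.Set.add s x → y ∈ s ∨ y = x := by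
        intro y hy
        by_cases h : x ∈ s
        · rw [show PySem.Set.add s x = s by simp [PySem.Set.add, h]] at hy
          exact Or.inl hy
        · rw [show PySem.Set.add s x = s ++ [x] by simp [PySem.Set.add, h]] at hy
          simpa using hy
      simp only [hq]
      refine ih (PySem.Set.add s x) hadd_none ?_ ?_
      · intro y hy hqy hmem
        have hyne : y ≠ x := by rintro rfl; simp [hqy] at hq
        rcases hmem_add y hmem with h | h
        · exact hdisj y (List.mem_cons_of_mem _ hy) hqy h
        · exact hyne h
      · intro y hy hqy
        have hyne : y ≠ x := by rintro rfl; simp [hqy] at hq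
        have := hdup y (List.mem_cons_of_mem _ hy) hqy
        simpa [List.count_cons, Ne.symm hyne] using this

lemma find?_dedup (q : List Int → Bool) (S : List (List Int))
    (hdup : ∀ x ∈ S, q x = true → S.count x = 1) :
    (PySem.List.dedup S).find? q = S.find? q := by
  unfold PySem.List.dedup PySem.Set.ofList
  exact find?_foldl_add q S PySem.Set.empty rfl (by intro x _ _ h; simp [PySem.Set.empty] at h) hdup

-- group size = multiplicity of the signature
lemma oddGrp_length (l : List (String × List Int)) (k : List Int) :
    (oddGrp l k).length = (l.map (·.2)).count k := by
  unfold oddGrp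
  rw [List.length_map, ← List.countP_eq_length_filter, List.count_eq_countP, List.countP_map]
  rfl

-- the central combinatorial fact: A's scan of the signature groups, in dict insertion order,
-- returns exactly the first element of l whose signature has multiplicity 1
lemma central (l : List (String × List Int)) :
    oddFindA ((PySem.List.dedup (l.map (·.2))).map (fun k => (k, oddGrp l k))) =
      match l.find? (fun p => (l.map (·.2)).count p.2 == 1) with
      | some p => p.1
      | none => "" := by
  set S := l.map (·.2) with hS
  rw [oddFindA_map]
  have hq : ∀ k, ((oddGrp l k).length == 1) = (S.count k == 1) := by
    intro k; rw [oddGrp_length, ← hS]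
  simp only [hq]
  rw [find?_dedup _ S (by intro x _ hx; exact beq_iff_eq.mp hx)]
  have hmap : S.find? (fun k => S.count k == 1) =
      (l.find? (fun p => S.count p.2 == 1)).map (·.2) := by
    rw [hS, List.find?_map]; rfl
  rw [hmap]
  cases hfind : l.find? (fun p => S.count p.2 == 1) with
  | none => rfl
  | some p =>
    simp only [Option.map_some]
    have hp_mem : p ∈ l := List.mem_of_find?_eq_some hfind
    have hp_q : S.count p.2 = 1 := by
      have := List.find?_some hfind
      simpa using this
    have hfilter : l.filter (fun x => x.2 == p.2) = [p] := by
      have hlen : (l.filter (fun x => x.2 == p.2)).length = 1 := by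
        have := oddGrp_length l p.2
        unfold oddGrp at this
        rw [List.length_map] at this
        rw [this, ← hS, hp_q]
      obtain ⟨a, ha⟩ := List.length_eq_one_iff.mp hlen
      have : p ∈ l.filter (fun x => x.2 == p.2) := List.mem_filter.mpr ⟨hp_mem, by simp⟩
      rw [ha] at this ⊢
      simp only [List.mem_singleton] at this
      rw [this]
    have : oddGrp l p.2 = [p.1] := by unfold oddGrp; rw [hfilter]; rfl
    rw [this]
    rfl

-- zipping-free analogue: words paired with their own signatures
lemma find?_pair (words : List String) (key : String → List Int) :
    (words.map (fun w => (w, key w))).find?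
        (fun p => ((words.map (fun w => (w, key w))).map (·.2)).count p.2 == 1) =
      (words.find? (fun w => (words.map key).count (key w) == 1)).map
        (fun w => (w, key w)) := by
  have hSmap : (words.map (fun w => (w, key w))).map (·.2) = words.map key := by
    rw [List.map_map]; rfl
  rw [hSmap, List.find?_map]
  rfl

-- ===== VERDICT (by name: the statement is the Claim_ definition above) =====
theorem oddString_spec : Claim_equal_oddString := by
  intro words _hdom hpre
  obtain ⟨hne, _hlen, _hex⟩ := hpre
  obtain ⟨w0, t, rfl⟩ := List.exists_cons_of_ne_nil hne
  simp only [Spec_oddString, oddString, oddString_alt]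
  set words := w0 :: t with hwords
  set n0 := w0.toList.length with hn0
  have hhead : PySem.List.pyGetD words 0 "" = w0 := PySem.List.pyGetD_zero_cons w0 t ""
  have hn : PySem.Str.len (PySem.List.pyGetD words 0 "") = (n0 : Int) := by
    rw [hhead, PySem.Str.len_eq]
  rw [hn]
  have hA : ∀ w : String, oddDiffA (n0 : Int) w = oddSig n0 w.toList := fun w => oddDiffA_eq n0 w
  set key : String → List Int := fun w => oddSig n0 w.toList with hkey
  set L : List (String × List Int) := words.map (fun w => (w, key w)) with hL
  -- B side: brute-force scan = first word of unique signature
  have hBscan : oddScanB (n0 : Int) words words =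
      match words.find? (fun w => (words.map key).count (key w) == 1) with
      | some w => w
      | none => "" := by
    rw [oddScanB_find]
    have hpred : (fun w => words.countP (fun v => sameSig (n0 : Int) w v) == 1) =
        (fun w => (words.map key).count (key w) == 1) := by
      funext w
      rw [countP_sameSig n0 words w]
    rw [hpred]
  rw [hBscan]
  -- A side
  simp only [hA]
  set d := words.foldl (fun d w => d.modify (key w) [] (· ++ [w]))
      (PySem.Dict.empty : PySem.Dict (List Int) (List String)) with hd
  have hSmap : L.map (·.2) = words.map key := by
    rw [hL, List.map_map]; rfl
  have hkeys : d.keys = PySem.List.dedup (words.map key) := by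
    rw [hd, PySem.Dict.keys_foldl_modify_key words key [] (fun _ w => (· ++ [w]))]
    simp [PySem.Dict.keys_empty, PySem.Set.update, PySem.List.dedup, PySem.Set.ofList,
      PySem.Set.empty]
  have hnodup : d.keys.Nodup := by
    rw [hd]
    exact PySem.Dict.nodup_keys_foldl_modify_key words key [] (fun _ w => (· ++ [w])) _
      (by simp)
  have hgetD : ∀ k, d.getD k [] = oddGrp L k := by
    intro k
    have hfold : words.foldl (fun d w => d.modify (key w) [] (· ++ [w]))
        (PySem.Dict.empty : PySem.Dict (List Int) (List String)) =
        (words.map (fun w => (key w, w))).foldl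
          (fun d p => d.modify p.1 [] (· ++ [p.2])) PySem.Dict.empty := by
      rw [List.foldl_map]
    rw [hd, hfold, PySem.Dict.getD_foldl_modify_append]
    unfold oddGrp
    rw [hL]
    simp [List.filter_map, List.map_map, PySem.Dict.getD_empty, Function.comp_def]
  have hitems : d.items = (PySem.List.dedup (L.map (·.2))).map (fun k => (k, oddGrp L k)) := by
    rw [PySem.Dict.items_eq_map_keys d hnodup [], hkeys, hSmap]
    exact List.map_congr_left (fun k _ => by rw [hgetD k])
  rw [hitems, central L]
  rw [find?_pair words key]
  cases words.find? (fun w => (words.map key).count (key w) == 1) <;> rfl
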